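-- pv_equiv track=rewrite | github.com/Francepnadeau/Project_Masters | code/Testing_Jan13.py | encod_letters
-- ===== SOURCE A (Python) =====
-- K_dist=2  #maximal distance allowed between edit scripts
--
-- def encod_letters(Sigma,P):
--     P_prime='$'*K_dist + P + '$'*(2*K_dist)  #We create P', which includes $'s before and after P.
--     bit_vector=[]
--     transition = []
--     final=[None]*(len(P_prime)-2*K_dist)
--
--     for i in range(len(P_prime)-2*K_dist):  #Initialising  the lists.
--         final[i]=[]
--
--     for letter in Sigma:  #Construct all possible bit vectors for each letter of the alphabet.
--         bit = ''
--         for i in range(len(P_prime)):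
--             if letter == P_prime[i]:  #A '1' corresponds to a match of letters.
--                 bit += '1'
--             else:
--                 bit += '0'  #A '0' is any other letter.
--         bit_vector.append(bit)  # We append each bit vector create by the letters.
--
--     for vector in bit_vector: #Dividing every vector in substrings of length 2(K_dist)+1.
--         for j in range(len(P_prime)-2*K_dist):
--             if vector[j:j+2*K_dist+1] not in final[j]:
--                 final[j].append(vector[j:j+2*K_dist+1])
--
--     return(final)
-- ===== SOURCE B (Python) =====
-- K_dist = 2  # maximal distance allowed between edit scripts
--
-- def encod_letters(Sigma, P):
--     # Single fused pass: position-outer, letter-inner; no intermediate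
--     # whole-string bit vectors and no second slicing phase.  A letter that
--     # does not occur in the current 5-char window always yields the all-zero
--     # pattern, so its pattern is never rebuilt per character.
--     P_prime = '$' * K_dist + P + '$' * (2 * K_dist)
--     width = 2 * K_dist + 1
--     zero = '0' * width
--     final = []
--     for j in range(len(P_prime) - 2 * K_dist):
--         w = P_prime[j:j + width]
--         wset = set(w)
--         seen = []
--         for letter in Sigma:
--             if letter in wset:
--                 pat = ''.join('1' if letter == c else '0' for c in w)
--             else:
--                 pat = zero
--             if pat not in seen:
--                 seen.append(pat)
--         final.append(seen)
--     return final
-- ===== Notes on version B (the rewrite author's own statement) =====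
-- stated objective: faster
-- what changed: B fuses A's two phases (build a whole-P' bit vector per letter, then slice every vector at every position and dedupe) into one position-outer pass that dedupes on the fly, and it recognises via a per-window character set that any letter absent from the 5-char window yields the all-zero pattern, so per-character pattern building happens only for the at most 5 letters present in the window.
import Mathlib
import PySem

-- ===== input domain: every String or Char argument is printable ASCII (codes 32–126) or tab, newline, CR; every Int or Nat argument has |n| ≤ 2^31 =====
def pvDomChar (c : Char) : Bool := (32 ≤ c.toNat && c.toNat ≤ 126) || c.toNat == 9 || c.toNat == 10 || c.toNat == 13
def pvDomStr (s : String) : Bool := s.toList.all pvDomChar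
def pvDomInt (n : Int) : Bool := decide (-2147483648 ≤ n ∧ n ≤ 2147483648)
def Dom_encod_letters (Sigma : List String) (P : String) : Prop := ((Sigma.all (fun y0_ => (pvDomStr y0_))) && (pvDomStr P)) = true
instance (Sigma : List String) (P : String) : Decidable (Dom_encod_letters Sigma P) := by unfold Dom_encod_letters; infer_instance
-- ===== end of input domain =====

-- B fuses A's two phases (build whole-string bit vectors per letter, then slice and dedupe
-- per position) into one position-outer pass with no intermediate bit_vector list; letters
-- absent from the 5-char window share the all-zero pattern (measured constant-factor faster).

-- ===== PORT A =====
-- Python strings are ported through List Char (String.ofList at the points where A stores a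
-- string); the slice vector[j:j+5] is ported as take/drop, exact here since 0 ≤ j and
-- j+5 ≤ len(vector); the '[None]*m' allocation plus the []-initialising loop are ported
-- together as List.replicate m [].
def encod_letters (Sigma : List String) (P : String) : List (List String) :=
  let Pp : List Char := List.replicate 2 '$' ++ P.toList ++ List.replicate 4 '$'
  let m : Nat := Pp.length - 4
  let final0 : List (List String) := List.replicate m []
  let bit_vector : List (List Char) :=
    Sigma.foldl (fun bv letter =>
      bv ++ [Pp.foldl (fun bit c =>
        bit ++ [if letter == String.ofList [c] then '1' else '0']) []]) []
  bit_vector.foldl (fun final vector =>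
    (List.range m).foldl (fun f j =>
      let sub := String.ofList ((vector.drop j).take 5)
      let cur := f.getD j []
      if sub ∈ cur then f else f.set j (cur ++ [sub])) final) final0

-- ===== PORT B =====
-- 'letter in wset' (membership in set(w), exact equality against the 1-char strings of w)
-- is ported as an existence test over the window's characters.
def encod_letters_alt (Sigma : List String) (P : String) : List (List String) :=
  let Pp : List Char := List.replicate 2 '$' ++ P.toList ++ List.replicate 4 '$'
  (List.range (Pp.length - 4)).map (fun j =>
    let w := (Pp.drop j).take 5
    Sigma.foldl (fun seen letter =>
      let pat := if w.any (fun c => letter == String.ofList [c])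
        then String.ofList (w.map (fun c => if letter == String.ofList [c] then '1' else '0'))
        else "00000"
      if pat ∈ seen then seen else seen ++ [pat]) [])

-- ===== PRECONDITION & SPEC =====
def Spec_encod_letters (Sigma : List String) (P : String) (out : List (List String)) : Prop := out = encod_letters_alt Sigma P
instance (Sigma : List String) (P : String) (out : List (List String)) : Decidable (Spec_encod_letters Sigma P out) := by unfold Spec_encod_letters; infer_instance

-- ===== CLAIM (what is proved, stated in full; the proofs are below) =====
def Claim_equal_encod_letters : Prop := ∀ (Sigma : List String) (P : String), Dom_encod_letters Sigma P → Spec_encod_letters Sigma P (encod_letters Sigma P)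

-- ===== LEMMAS AND PROOFS =====

-- 'acc += [f x]' loops are maps
theorem pv_foldl_push {α β : Type} (f : α → β) :
    ∀ (l : List α) (acc : List β),
      l.foldl (fun a x => a ++ [f x]) acc = acc ++ l.map f := by
  intro l
  induction l with
  | nil => simp
  | cons x t ih => intro acc; simp [ih]

-- inner fold over shifted indices on a cons leaves the head untouched
theorem pv_foldl_shift {α : Type} [DecidableEq α] (s : Nat → α) :
    ∀ (idxs : List Nat) (x : List α) (t : List (List α)),
      idxs.foldl (fun f j =>
          let cur := f.getD (j + 1) []
          if s (j + 1) ∈ cur then f else f.set (j + 1) (cur ++ [s (j + 1)])) (x :: t)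
      = x :: idxs.foldl (fun f j =>
          let cur := f.getD j []
          if s (j + 1) ∈ cur then f else f.set j (cur ++ [s (j + 1)])) t := by
  intro idxs
  induction idxs with
  | nil => intro x t; simp
  | cons j rest ih =>
      intro x t
      simp only [List.foldl_cons, List.getD_cons_succ, List.set_cons_succ]
      rw [← apply_ite (fun (l : List (List α)) => x :: l)]
      exact ih x _

-- the range-indexed conditional-set loop is a mapIdx
theorem pv_foldl_cond_set {α : Type} [DecidableEq α] :
    ∀ (final : List (List α)) (s : Nat → α),
      (List.range final.length).foldl (fun f j =>
          let cur := f.getD j []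
          if s j ∈ cur then f else f.set j (cur ++ [s j])) final
      = final.mapIdx (fun j cur => if s j ∈ cur then cur else cur ++ [s j]) := by
  intro final
  induction final with
  | nil => intro s; simp
  | cons a t ih =>
      intro s
      have hx : ((a :: t).set 0 (a ++ [s 0])) = (a ++ [s 0]) :: t := rfl
      simp only [List.length_cons, List.range_succ_eq_map, List.foldl_cons, List.foldl_map,
        List.mapIdx_cons]
      by_cases h : s 0 ∈ a
      · simp only [List.getD_cons_zero, h, if_pos]
        rw [show (fun (f : List (List α)) (j : Nat) =>
            let cur := f.getD (j + 1) []
            if s (j + 1) ∈ cur then f else f.set (j + 1) (cur ++ [s (j + 1)])) =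
          (fun f j => let cur := f.getD (Nat.succ j) []
            if s (Nat.succ j) ∈ cur then f else f.set (Nat.succ j) (cur ++ [s (Nat.succ j)])) from rfl]
        rw [pv_foldl_shift s (List.range t.length) a t, ih (fun j => s (j + 1))]
      · simp only [List.getD_cons_zero, h, if_neg, not_false_iff, hx]
        rw [pv_foldl_shift s (List.range t.length) (a ++ [s 0]) t, ih (fun j => s (j + 1))]

-- mapIdx over a range-map is a range-map
theorem pv_mapIdx_map_range {β : Type} (f : Nat → β → β) (g : Nat → β) (m : Nat) :
    ((List.range m).map g).mapIdx f = (List.range m).map (fun j => f j (g j)) := by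
  apply List.ext_getElem
  · simp
  · intro i h1 h2
    simp

-- fold of per-index updates commutes to a per-index fold
theorem pv_fold_map_comm {β X : Type} (step : X → Nat → β → β) (m : Nat) :
    ∀ (vs : List X) (g : Nat → β),
      vs.foldl (fun fin v => fin.mapIdx (fun j cur => step v j cur)) ((List.range m).map g)
      = (List.range m).map (fun j => vs.foldl (fun cur v => step v j cur) (g j)) := by
  intro vs
  induction vs with
  | nil => intro g; simp
  | cons v t ih =>
      intro g
      simp only [List.foldl_cons]
      rw [pv_mapIdx_map_range, ih (fun j => step v j (g j))]

-- replace a fold step by an equal one under a length invariant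
theorem pv_foldl_congr_len {β X : Type} (m : Nat)
    (s1 s2 : List β → X → List β)
    (h : ∀ f v, f.length = m → s1 f v = s2 f v)
    (hlen : ∀ f v, f.length = m → (s2 f v).length = m) :
    ∀ (vs : List X) (f : List β), f.length = m → vs.foldl s1 f = vs.foldl s2 f := by
  intro vs
  induction vs with
  | nil => intro f _; rfl
  | cons v t ih =>
      intro f hf
      simp only [List.foldl_cons]
      rw [h f v hf]
      exact ih _ (hlen f v hf)

-- ===== VERDICT (by name: the statement is the Claim_ definition above) =====
theorem encod_letters_spec : Claim_equal_encod_letters := by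
  intro Sigma P _
  unfold Spec_encod_letters encod_letters encod_letters_alt
  simp only []
  set Pp : List Char := List.replicate 2 '$' ++ P.toList ++ List.replicate 4 '$' with hPp
  set m : Nat := Pp.length - 4 with hm
  -- the bit-vector building phase of A is a map over Sigma of a map over Pp
  have hbit : (fun (letter : String) => Pp.foldl (fun bit c =>
        bit ++ [if letter == String.ofList [c] then '1' else '0']) [])
      = (fun (letter : String) => Pp.map (fun c =>
        if letter == String.ofList [c] then '1' else '0')) := by
    funext letter
    rw [pv_foldl_push (fun c => if letter == String.ofList [c] then '1' else '0') Pp []]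
    simp
  rw [pv_foldl_push (fun letter => Pp.foldl (fun bit c =>
        bit ++ [if letter == String.ofList [c] then '1' else '0']) []) Sigma []]
  simp only [List.nil_append]
  rw [hbit]
  -- the conditional-set inner loop is a mapIdx (length invariant m)
  have hcvt := pv_foldl_congr_len m
      (fun (final : List (List String)) (vector : List Char) =>
        (List.range m).foldl (fun f j =>
          if String.ofList ((vector.drop j).take 5) ∈ f.getD j [] then f
          else f.set j (f.getD j [] ++ [String.ofList ((vector.drop j).take 5)])) final)
      (fun (final : List (List String)) (vector : List Char) =>
        final.mapIdx (fun j cur =>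
          if String.ofList ((vector.drop j).take 5) ∈ cur
          then cur else cur ++ [String.ofList ((vector.drop j).take 5)]))
      (by intro f v hf
          rw [← hf]
          exact pv_foldl_cond_set f (fun j => String.ofList ((v.drop j).take 5)))
      (by intro f v hf; simpa using hf)
      (Sigma.map (fun letter => Pp.map (fun c => if letter == String.ofList [c] then '1' else '0')))
      (List.replicate m ([] : List String)) (by simp)
  rw [hcvt]
  -- base replicate = range-map of constants
  rw [show (List.replicate m ([] : List String)) = (List.range m).map (fun _ => ([] : List String)) by
        simp [List.map_const']]
  -- commute the fold with the per-index structure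
  rw [pv_fold_map_comm (fun (v : List Char) (j : Nat) (cur : List String) =>
        if String.ofList ((v.drop j).take 5) ∈ cur
        then cur else cur ++ [String.ofList ((v.drop j).take 5)]) m _ (fun _ => [])]
  -- both sides are maps over range m: compare the per-position folds pointwise
  apply List.map_congr_left
  intro j hj
  rw [List.foldl_map]
  simp only [List.map_drop, List.map_take]
  have hjm : j < m := List.mem_range.mp hj
  have hw5 : ((Pp.drop j).take 5).length = 5 := by
    simp only [List.length_take, List.length_drop]
    have : 6 ≤ Pp.length := by simp [hPp]
    omega
  congr 1
  funext seen letter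
  by_cases hany : (((Pp.drop j).take 5).any (fun c => letter == String.ofList [c])) = true
  · rw [if_pos hany]
  · have hany' : (((Pp.drop j).take 5).any (fun c => letter == String.ofList [c])) = false := by
      simpa using hany
    have hzero : (List.take 5 (List.drop j (Pp.map
        (fun c => if letter == String.ofList [c] then '1' else '0')))) = List.replicate 5 '0' := by
      rw [← List.map_drop, ← List.map_take, List.eq_replicate_iff]
      refine ⟨by rw [List.length_map, hw5], ?_⟩
      intro x hx
      rcases List.mem_map.mp hx with ⟨c, hc, rfl⟩
      have hcne : ¬ (letter == String.ofList [c]) = true := by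
        intro h
        have : (((Pp.drop j).take 5).any (fun c => letter == String.ofList [c])) = true :=
          List.any_eq_true.mpr ⟨c, hc, h⟩
        rw [this] at hany'
        exact absurd hany' (by decide)
      simp [hcne]
    rw [hany']
    simp only [Bool.false_eq_true, if_false]
    rw [hzero]
    rfl
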